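-- pv_equiv track=rewrite | github.com/soldrag/veeam_tasks | task_2/check_hash.py | validate_hash_result
-- ===== SOURCE A (Python) =====
-- import string
--
-- def validate_hash_result(hash_result: str, hash_function: str) -> bool:
--     """Validating hash from tasks file."""
--     is_hex = all(digit in string.hexdigits for digit in hash_result)
--     len_validator = {
--         'md5': 32,
--         'sha1': 40,
--         'sha256': 64
--     }
--     is_len_hash = len(hash_result) == len_validator[hash_function]
--     return is_hex and is_len_hash
-- ===== SOURCE B (Python) =====
-- def validate_hash_result(hash_result: str, hash_function: str) -> bool:
--     """Validating hash from tasks file."""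
--
--     def match(s, i, remaining):
--         # matches the regex [0-9a-fA-F]{remaining} against s[i:]
--         if remaining == 0:
--             return i == len(s)
--         if i == len(s):
--             return False
--         c = s[i]
--         if not ('0' <= c <= '9' or 'a' <= c <= 'f' or 'A' <= c <= 'F'):
--             return False
--         return match(s, i + 1, remaining - 1)
--
--     return match(hash_result, 0, {'md5': 32, 'sha1': 40, 'sha256': 64}[hash_function])
-- ===== Notes on version B (the rewrite author's own statement) =====
-- stated objective: alternative
-- what changed: B replaces A's two staged checks (full character scan against string.hexdigits plus a separate length comparison) with a single recursive matcher that consumes the string like the regex [0-9a-fA-F]{n}, enforcing charset and exact length in one fused pass with a countdown and early exit.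
import Mathlib
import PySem

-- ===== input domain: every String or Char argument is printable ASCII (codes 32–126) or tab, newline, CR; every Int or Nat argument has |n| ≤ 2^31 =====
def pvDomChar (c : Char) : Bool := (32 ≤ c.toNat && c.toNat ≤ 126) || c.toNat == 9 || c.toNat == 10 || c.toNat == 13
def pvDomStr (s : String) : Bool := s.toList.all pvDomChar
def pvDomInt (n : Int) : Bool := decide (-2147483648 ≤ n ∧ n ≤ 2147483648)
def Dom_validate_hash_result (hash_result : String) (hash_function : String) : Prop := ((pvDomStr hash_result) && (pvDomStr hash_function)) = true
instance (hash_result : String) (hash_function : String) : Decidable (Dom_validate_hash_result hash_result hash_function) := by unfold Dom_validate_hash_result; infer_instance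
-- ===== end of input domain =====

-- B fuses A's two staged checks into one recursive matcher that consumes the string like the
-- regex [0-9a-fA-F]{n}, enforcing charset and exact length in a single pass (objective: alternative).

-- ===== PORT A =====
-- string.hexdigits
def pvHexdigits : List Char := "0123456789abcdefABCDEF".toList

def validate_hash_result (hash_result : String) (hash_function : String) : Bool :=
  -- is_hex = all(digit in string.hexdigits for digit in hash_result)
  let is_hex := hash_result.toList.all (fun digit => pvHexdigits.contains digit)
  -- len_validator = {'md5': 32, 'sha1': 40, 'sha256': 64}
  let len_validator : PySem.Dict String Int :=
    (PySem.Dict.empty.insert "md5" 32 |>.insert "sha1" 40 |>.insert "sha256" 64)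
  -- is_len_hash = len(hash_result) == len_validator[hash_function]  (KeyError → none, excluded by Pre_)
  match len_validator.get? hash_function with
  | none => false
  | some n =>
      let is_len_hash := ((hash_result.toList.length : Int) == n)
      is_hex && is_len_hash

-- ===== PORT B =====
-- '0' <= c <= '9' or 'a' <= c <= 'f' or 'A' <= c <= 'F'
def pvIsHexChar (c : Char) : Bool :=
  (48 ≤ c.toNat && c.toNat ≤ 57) || (97 ≤ c.toNat && c.toNat ≤ 102) || (65 ≤ c.toNat && c.toNat ≤ 70)

-- Source B's inner `match(s, i, remaining)`: the suffix s[i:] is the list argument here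
def pvMatchHex (s : List Char) (remaining : Int) : Bool :=
  if remaining == 0 then s.isEmpty
  else
    match s with
    | [] => false
    | c :: t => if pvIsHexChar c then pvMatchHex t (remaining - 1) else false
termination_by s

def validate_hash_result_alt (hash_result : String) (hash_function : String) : Bool :=
  match PySem.Dict.get? (PySem.Dict.empty.insert "md5" (32 : Int) |>.insert "sha1" 40 |>.insert "sha256" 64) hash_function with
  | none => false   -- KeyError in Python, excluded by Pre_
  | some n => pvMatchHex hash_result.toList n

-- ===== PRECONDITION & SPEC =====
-- Pre_ excludes exactly the inputs where the Python A raises KeyError: hash_function not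
-- one of the three known keys (B raises KeyError there too).
def Pre_validate_hash_result (hash_result : String) (hash_function : String) : Prop :=
  hash_function = "md5" ∨ hash_function = "sha1" ∨ hash_function = "sha256"
instance (hash_result : String) (hash_function : String) : Decidable (Pre_validate_hash_result hash_result hash_function) := by unfold Pre_validate_hash_result; infer_instance

def pvWitness_validate_hash_result : String × String := ("d41d8cd98f00b204e9800998ecf8427e", "md5")

def Spec_validate_hash_result (hash_result : String) (hash_function : String) (out : Bool) : Prop := out = validate_hash_result_alt hash_result hash_function
instance (hash_result : String) (hash_function : String) (out : Bool) : Decidable (Spec_validate_hash_result hash_result hash_function out) := by unfold Spec_validate_hash_result; infer_instance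

-- ===== CLAIM (what is proved, stated in full; the proofs are below) =====
def Claim_equal_validate_hash_result : Prop := ∀ (hash_result : String) (hash_function : String), Dom_validate_hash_result hash_result hash_function → Pre_validate_hash_result hash_result hash_function → Spec_validate_hash_result hash_result hash_function (validate_hash_result hash_result hash_function)

-- ===== LEMMAS AND PROOFS =====

theorem pv_char_eq_iff_toNat (c d : Char) : (c = d) ↔ (c.toNat = d.toNat) := by
  constructor
  · intro h; rw [h]
  · intro h; exact Char.ext (UInt32.toNat_inj.mp h)

-- membership in string.hexdigits coincides with B's range classification
theorem pv_mem_hexdigits_eq_isHex (c : Char) : decide (c ∈ pvHexdigits) = pvIsHexChar c := by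
  have h : pvHexdigits = ['0','1','2','3','4','5','6','7','8','9','a','b','c','d','e','f','A','B','C','D','E','F'] := rfl
  rw [h, Bool.eq_iff_iff]
  simp only [List.mem_cons, List.not_mem_nil, or_false, pvIsHexChar, pv_char_eq_iff_toNat,
    decide_eq_true_eq, Bool.or_eq_true, Bool.and_eq_true,
    show ('0' : Char).toNat = 48 from rfl, show ('1' : Char).toNat = 49 from rfl,
    show ('2' : Char).toNat = 50 from rfl, show ('3' : Char).toNat = 51 from rfl,
    show ('4' : Char).toNat = 52 from rfl, show ('5' : Char).toNat = 53 from rfl,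
    show ('6' : Char).toNat = 54 from rfl, show ('7' : Char).toNat = 55 from rfl,
    show ('8' : Char).toNat = 56 from rfl, show ('9' : Char).toNat = 57 from rfl,
    show ('a' : Char).toNat = 97 from rfl, show ('b' : Char).toNat = 98 from rfl,
    show ('c' : Char).toNat = 99 from rfl, show ('d' : Char).toNat = 100 from rfl,
    show ('e' : Char).toNat = 101 from rfl, show ('f' : Char).toNat = 102 from rfl,
    show ('A' : Char).toNat = 65 from rfl, show ('B' : Char).toNat = 66 from rfl,
    show ('C' : Char).toNat = 67 from rfl, show ('D' : Char).toNat = 68 from rfl,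
    show ('E' : Char).toNat = 69 from rfl, show ('F' : Char).toNat = 70 from rfl]
  omega

-- characterisation of B's fused matcher: exact length AND all-hex
theorem pv_matchHex_eq (l : List Char) (n : Int) (hn : 0 ≤ n) :
    pvMatchHex l n = (l.all pvIsHexChar && ((l.length : Int) == n)) := by
  induction l generalizing n with
  | nil =>
      rw [pvMatchHex]
      by_cases h : n = 0
      · simp [h]
      · have hb : (n == 0) = false := by simpa using h
        have hb2 : ((0 : Int) == n) = false := by simpa using fun e => h e.symm
        simp [hb, hb2]
  | cons c t ih =>
      rw [pvMatchHex]
      by_cases h : n = 0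
      · subst h
        have hz : (((c :: t).length : Int) == 0) = false := by
          rw [beq_eq_false_iff_ne]
          simp only [List.length_cons]
          push_cast
          omega
        rw [if_pos (by decide : ((0:Int) == 0) = true), hz, Bool.and_false]
        rfl
      · have h1 : 0 ≤ n - 1 := by omega
        have hb : (n == 0) = false := by simpa using h
        rw [hb]
        simp only [Bool.false_eq_true, if_false]
        by_cases hc : pvIsHexChar c = true
        · rw [if_pos hc, ih _ h1]
          simp only [List.all_cons, hc, Bool.true_and]
          congr 1
          rw [Bool.eq_iff_iff]
          simp only [beq_iff_eq, List.length_cons]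
          push_cast
          omega
        · rw [if_neg hc]
          simp [hc]

theorem pv_all_hex_eq (l : List Char) :
    (l.all fun d => pvHexdigits.contains d) = l.all pvIsHexChar := by
  induction l with
  | nil => rfl
  | cons a t ih =>
      simp only [List.all_cons, ih]
      rw [show pvHexdigits.contains a = decide (a ∈ pvHexdigits) from by simp,
        pv_mem_hexdigits_eq_isHex]

-- the three dict lookups, evaluated once
theorem pv_dict_md5 : PySem.Dict.get? (PySem.Dict.empty.insert "md5" (32 : Int) |>.insert "sha1" 40 |>.insert "sha256" 64) "md5" = some 32 := by decide
theorem pv_dict_sha1 : PySem.Dict.get? (PySem.Dict.empty.insert "md5" (32 : Int) |>.insert "sha1" 40 |>.insert "sha256" 64) "sha1" = some 40 := by decide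
theorem pv_dict_sha256 : PySem.Dict.get? (PySem.Dict.empty.insert "md5" (32 : Int) |>.insert "sha1" 40 |>.insert "sha256" 64) "sha256" = some 64 := by decide

-- ===== VERDICT (by name: the statement is the Claim_ definition above) =====
theorem validate_hash_result_spec : Claim_equal_validate_hash_result := by
  intro hash_result hash_function _ hpre
  unfold Spec_validate_hash_result validate_hash_result validate_hash_result_alt
  rcases hpre with h | h | h <;> subst h
  · simp only [pv_dict_md5]
    rw [pv_matchHex_eq hash_result.toList 32 (by norm_num), pv_all_hex_eq]
  · simp only [pv_dict_sha1]
    rw [pv_matchHex_eq hash_result.toList 40 (by norm_num), pv_all_hex_eq]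
  · simp only [pv_dict_sha256]
    rw [pv_matchHex_eq hash_result.toList 64 (by norm_num), pv_all_hex_eq]
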